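-- pv_equiv track=rewrite | github.com/vijaykas/investment-screener | sector_rotation.py | _infer_cycle_phase
-- ===== SOURCE A (Python) =====
-- SECTOR_ETFS = {
--     "XLK":  "Technology",
--     "XLF":  "Financials",
--     "XLE":  "Energy",
--     "XLV":  "Healthcare",
--     "XLY":  "Consumer Disc.",
--     "XLP":  "Consumer Staples",
--     "XLI":  "Industrials",
--     "XLB":  "Materials",
--     "XLU":  "Utilities",
--     "XLRE": "Real Estate",
--     "XLC":  "Comm. Services",
-- }
--
-- CYCLE_PHASES = {
--     "Early Recovery":  ["XLF", "XLY", "XLI", "XLK"],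
--     "Mid Expansion":   ["XLK", "XLB", "XLE", "XLI"],
--     "Late Cycle":      ["XLE", "XLV", "XLP", "XLU"],
--     "Contraction":     ["XLU", "XLP", "XLV", "XLRE"],
-- }
--
-- def _infer_cycle_phase(sector_scores: dict) -> str:
--     """
--     Infer which economic cycle phase we're in based on which sectors
--     are leading (score ≥ 60).
--     """
--     leading = [t for t, d in sector_scores.items() if d.get("score", 0) >= 60]
--
--     phase_matches = {}
--     for phase, etfs in CYCLE_PHASES.items():
--         overlap = len(set(leading) & set(etfs))
--         if overlap > 0:
--             phase_matches[phase] = overlap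
--
--     if not phase_matches:
--         return "Unclear / Transitional"
--
--     best_phase = max(phase_matches, key=phase_matches.get)
--     top_sectors = [SECTOR_ETFS.get(t, t) for t in leading if t in CYCLE_PHASES.get(best_phase, [])]
--
--     return f"{best_phase} (led by {', '.join(top_sectors[:3])})"
-- ===== SOURCE B (Python) =====
-- SECTOR_ETFS = {
--     "XLK":  "Technology",
--     "XLF":  "Financials",
--     "XLE":  "Energy",
--     "XLV":  "Healthcare",
--     "XLY":  "Consumer Disc.",
--     "XLP":  "Consumer Staples",
--     "XLI":  "Industrials",
--     "XLB":  "Materials",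
--     "XLU":  "Utilities",
--     "XLRE": "Real Estate",
--     "XLC":  "Comm. Services",
-- }
--
-- CYCLE_PHASES = {
--     "Early Recovery":  ["XLF", "XLY", "XLI", "XLK"],
--     "Mid Expansion":   ["XLK", "XLB", "XLE", "XLI"],
--     "Late Cycle":      ["XLE", "XLV", "XLP", "XLU"],
--     "Contraction":     ["XLU", "XLP", "XLV", "XLRE"],
-- }
--
-- # Inverted index built once: ticker -> list of phase positions it votes for.
-- PHASE_NAMES = list(CYCLE_PHASES)
-- TICKER_TO_PHASES = {}
-- for _i, _etfs in enumerate(CYCLE_PHASES.values()):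
--     for _e in _etfs:
--         TICKER_TO_PHASES.setdefault(_e, []).append(_i)
--
--
-- def _infer_cycle_phase(sector_scores: dict) -> str:
--     """Per-ticker voting through an inverted ticker->phases index instead of
--     per-phase set intersections: each leading ticker bumps the tally of every
--     phase it belongs to; the winner is the first phase with the maximal tally."""
--     leading = [t for t, d in sector_scores.items() if d.get("score", 0) >= 60]
--
--     votes = [0] * len(PHASE_NAMES)
--     for t in leading:
--         for i in TICKER_TO_PHASES.get(t, ()):
--             votes[i] += 1
--
--     best = max(votes)
--     if best == 0:
--         return "Unclear / Transitional"
--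
--     best_phase = PHASE_NAMES[votes.index(best)]
--     winners = CYCLE_PHASES[best_phase]
--     top_sectors = [SECTOR_ETFS.get(t, t) for t in leading if t in winners]
--     return f"{best_phase} (led by {', '.join(top_sectors[:3])})"
-- ===== Notes on version B (the rewrite author's own statement) =====
-- stated objective: alternative
-- what changed: Inverts the traversal: instead of intersecting each phase's ETF set with the leading set and taking max over a phase_matches dict, B builds a ticker->phases inverted index once and has each leading ticker vote its phases into a tally list, then picks the first phase with max(votes)/votes.index; the per-phase set intersections and the intermediate dict disappear.
import Mathlib
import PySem

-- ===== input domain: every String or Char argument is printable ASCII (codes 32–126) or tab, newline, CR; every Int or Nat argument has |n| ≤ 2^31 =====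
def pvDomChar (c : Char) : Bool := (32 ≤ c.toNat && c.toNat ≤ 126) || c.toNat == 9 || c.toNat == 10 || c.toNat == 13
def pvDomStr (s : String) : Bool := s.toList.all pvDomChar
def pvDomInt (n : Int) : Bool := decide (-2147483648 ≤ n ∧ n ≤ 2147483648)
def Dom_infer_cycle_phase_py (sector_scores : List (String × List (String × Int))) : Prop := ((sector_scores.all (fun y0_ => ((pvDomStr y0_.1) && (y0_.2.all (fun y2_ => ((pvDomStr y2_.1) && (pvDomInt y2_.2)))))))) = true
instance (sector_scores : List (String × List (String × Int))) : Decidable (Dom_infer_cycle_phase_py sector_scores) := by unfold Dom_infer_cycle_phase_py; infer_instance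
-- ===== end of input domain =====

-- B replaces A's per-phase set intersections + phase_matches dict + max(key=get) with per-ticker
-- voting through an inverted ticker->phases index built once, then max(votes)/index over the tally
-- list (objective: alternative decomposition; same result, first maximal phase wins as with max).

-- ===== PORT A =====
-- The Python dict parameter is an assoc list here; Python's dict construction is Dict.ofList.
-- A's 'if not phase_matches: return …' followed by 'max(phase_matches, key=phase_matches.get)'
-- is the match on max? below: max? is none exactly when the dict (its key list) is empty.
def pvSECTOR_ETFS : PySem.Dict String String := PySem.Dict.ofList
  [("XLK", "Technology"), ("XLF", "Financials"), ("XLE", "Energy"), ("XLV", "Healthcare"),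
   ("XLY", "Consumer Disc."), ("XLP", "Consumer Staples"), ("XLI", "Industrials"),
   ("XLB", "Materials"), ("XLU", "Utilities"), ("XLRE", "Real Estate"), ("XLC", "Comm. Services")]

def pvCYCLE_PHASES : List (String × List String) :=
  [("Early Recovery", ["XLF", "XLY", "XLI", "XLK"]),
   ("Mid Expansion",  ["XLK", "XLB", "XLE", "XLI"]),
   ("Late Cycle",     ["XLE", "XLV", "XLP", "XLU"]),
   ("Contraction",    ["XLU", "XLP", "XLV", "XLRE"])]

def infer_cycle_phase_py (sector_scores : List (String × List (String × Int))) : String :=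
  let leading : List String :=
    ((PySem.Dict.ofList sector_scores).items.filter
      (fun p => decide ((60 : Int) ≤ PySem.Dict.getD (PySem.Dict.ofList p.2) "score" 0))).map (fun p => p.1)
  let phase_matches : PySem.Dict String Int :=
    pvCYCLE_PHASES.foldl (fun d pe =>
      let overlap : Int := PySem.Set.len (PySem.Set.inter (PySem.Set.ofList leading) (PySem.Set.ofList pe.2))
      if 0 < overlap then d.insert pe.1 overlap else d) PySem.Dict.empty
  match PySem.List.max? phase_matches.keys (fun k => phase_matches.getD k 0) with
  | none => "Unclear / Transitional"
  | some best_phase =>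
      let top_sectors : List String :=
        (leading.filter (fun t =>
          (PySem.Dict.getD (PySem.Dict.ofList pvCYCLE_PHASES) best_phase []).contains t)).map
          (fun t => pvSECTOR_ETFS.getD t t)
      best_phase ++ " (led by " ++ PySem.Str.join ", " (PySem.List.slice top_sectors none (some 3)) ++ ")"

-- ===== PORT B =====
def pvPHASE_NAMES : List String := ["Early Recovery", "Mid Expansion", "Late Cycle", "Contraction"]

-- votes[i] += 1 — exact for 0 ≤ i < v.length, the only indices the inverted index holds (0..3)
def pvIncr (v : List Int) (i : Int) : List Int := v.set i.toNat (v.getD i.toNat 0 + 1)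

-- module-level build loop: for i, etfs in enumerate(CYCLE_PHASES.values()): for e in etfs: setdefault(e, []).append(i)
def pvTICKER_TO_PHASES : PySem.Dict String (List Int) :=
  (PySem.List.enumerate (pvCYCLE_PHASES.map Prod.snd) 0).foldl
    (fun d ie => ie.2.foldl (fun d e => d.modify e [] (fun l => l ++ [ie.1])) d)
    PySem.Dict.empty

def infer_cycle_phase_py_alt (sector_scores : List (String × List (String × Int))) : String :=
  let leading : List String :=
    ((PySem.Dict.ofList sector_scores).items.filter
      (fun p => decide ((60 : Int) ≤ PySem.Dict.getD (PySem.Dict.ofList p.2) "score" 0))).map (fun p => p.1)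
  let votes : List Int :=
    leading.foldl (fun v t => (pvTICKER_TO_PHASES.getD t []).foldl pvIncr v)
      (List.replicate pvPHASE_NAMES.length (0 : Int))
  match PySem.List.max? votes (fun x => x) with
  | none => "Unclear / Transitional"   -- unreachable guard: votes always has 4 entries (max() would raise on [])
  | some best =>
    if best = 0 then "Unclear / Transitional"
    else
      match PySem.List.index? votes best with
      | none => "Unclear / Transitional"   -- unreachable guard: best ∈ votes (list.index would raise otherwise)
      | some k =>
        match pvPHASE_NAMES[k]? with
        | none => "Unclear / Transitional"   -- unreachable guard: k < 4
        | some best_phase =>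
            let winners : List String := PySem.Dict.getD (PySem.Dict.ofList pvCYCLE_PHASES) best_phase []
            let top_sectors : List String :=
              (leading.filter (fun t => winners.contains t)).map (fun t => pvSECTOR_ETFS.getD t t)
            best_phase ++ " (led by " ++ PySem.Str.join ", " (PySem.List.slice top_sectors none (some 3)) ++ ")"

-- ===== PRECONDITION & SPEC =====
def Spec_infer_cycle_phase_py (sector_scores : List (String × List (String × Int))) (out : String) : Prop := out = infer_cycle_phase_py_alt sector_scores
instance (sector_scores : List (String × List (String × Int))) (out : String) : Decidable (Spec_infer_cycle_phase_py sector_scores out) := by unfold Spec_infer_cycle_phase_py; infer_instance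

-- ===== CLAIM (what is proved, stated in full; the proofs are below) =====
def Claim_equal_infer_cycle_phase_py : Prop := ∀ (sector_scores : List (String × List (String × Int))), Dom_infer_cycle_phase_py sector_scores → Spec_infer_cycle_phase_py sector_scores (infer_cycle_phase_py sector_scores)

-- ===== LEMMAS AND PROOFS =====
set_option maxHeartbeats 4000000
set_option maxRecDepth 10000

def pvCnt (P : List String) (L : List String) : Int := ((L.filter (fun t => P.contains t)).length : Int)

theorem pv_overlap (L : List String) (hnd : L.Nodup) (e1 e2 e3 e4 : String)
    (hn : ([e1, e2, e3, e4] : List String).Nodup) :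
    PySem.Set.len (PySem.Set.inter (PySem.Set.ofList L) (PySem.Set.ofList [e1, e2, e3, e4]))
      = pvCnt [e1, e2, e3, e4] L := by
  rw [PySem.Set.ofList_eq_self_of_nodup _ hn, PySem.Set.ofList_eq_self_of_nodup _ hnd]
  show ((L.filter (fun x => [e1, e2, e3, e4].contains x)).length : Int) = pvCnt [e1, e2, e3, e4] L
  rfl

theorem pv_L_nodup (ss : List (String × List (String × Int))) :
    (((PySem.Dict.ofList ss).items.filter
      (fun p => decide ((60 : Int) ≤ PySem.Dict.getD (PySem.Dict.ofList p.2) "score" 0))).map (fun p => p.1)).Nodup := by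
  have hk : ((PySem.Dict.ofList ss).items.map (fun p => p.1)).Nodup := by
    have := PySem.Dict.nodup_keys_ofList (κ := String) (ν := List (String × Int)) ss
    simpa [PySem.Dict.keys] using this
  exact hk.sublist (List.Sublist.map _ List.filter_sublist)

def pvInd (P : List String) (t : String) : Int := if P.contains t then 1 else 0

theorem pvTTP_eq : pvTICKER_TO_PHASES = PySem.Dict.mk
    [("XLF", [0]), ("XLY", [0]), ("XLI", [0, 1]), ("XLK", [0, 1]), ("XLB", [1]),
     ("XLE", [1, 2]), ("XLV", [2, 3]), ("XLP", [2, 3]), ("XLU", [2, 3]), ("XLRE", [3])] := by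
  decide

theorem pv_step (t : String) (v1 v2 v3 v4 : Int) :
    (pvTICKER_TO_PHASES.getD t []).foldl pvIncr [v1, v2, v3, v4]
      = [v1 + pvInd ["XLF", "XLY", "XLI", "XLK"] t,
         v2 + pvInd ["XLK", "XLB", "XLE", "XLI"] t,
         v3 + pvInd ["XLE", "XLV", "XLP", "XLU"] t,
         v4 + pvInd ["XLU", "XLP", "XLV", "XLRE"] t] := by
  by_cases e1 : t = "XLF"
  · subst e1; rw [show pvTICKER_TO_PHASES.getD "XLF" [] = [0] from by decide]
    simp [pvIncr, pvInd, List.getD]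
  by_cases e2 : t = "XLY"
  · subst e2; rw [show pvTICKER_TO_PHASES.getD "XLY" [] = [0] from by decide]
    simp [pvIncr, pvInd, List.getD]
  by_cases e3 : t = "XLI"
  · subst e3; rw [show pvTICKER_TO_PHASES.getD "XLI" [] = [0, 1] from by decide]
    simp [pvIncr, pvInd, List.getD]
  by_cases e4 : t = "XLK"
  · subst e4; rw [show pvTICKER_TO_PHASES.getD "XLK" [] = [0, 1] from by decide]
    simp [pvIncr, pvInd, List.getD]
  by_cases e5 : t = "XLB"
  · subst e5; rw [show pvTICKER_TO_PHASES.getD "XLB" [] = [1] from by decide]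
    simp [pvIncr, pvInd, List.getD]
  by_cases e6 : t = "XLE"
  · subst e6; rw [show pvTICKER_TO_PHASES.getD "XLE" [] = [1, 2] from by decide]
    simp [pvIncr, pvInd, List.getD]
  by_cases e7 : t = "XLV"
  · subst e7; rw [show pvTICKER_TO_PHASES.getD "XLV" [] = [2, 3] from by decide]
    simp [pvIncr, pvInd, List.getD]
  by_cases e8 : t = "XLP"
  · subst e8; rw [show pvTICKER_TO_PHASES.getD "XLP" [] = [2, 3] from by decide]
    simp [pvIncr, pvInd, List.getD]
  by_cases e9 : t = "XLU"
  · subst e9; rw [show pvTICKER_TO_PHASES.getD "XLU" [] = [2, 3] from by decide]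
    simp [pvIncr, pvInd, List.getD]
  by_cases e10 : t = "XLRE"
  · subst e10; rw [show pvTICKER_TO_PHASES.getD "XLRE" [] = [3] from by decide]
    simp [pvIncr, pvInd, List.getD]
  · rw [pvTTP_eq]
    simp [PySem.Dict.getD, PySem.Dict.get?_mk_cons, PySem.Dict.get?, pvInd,
      Ne.symm e1, Ne.symm e2, Ne.symm e3, Ne.symm e4, Ne.symm e5,
      Ne.symm e6, Ne.symm e7, Ne.symm e8, Ne.symm e9, Ne.symm e10,
      e1, e2, e3, e4, e5, e6, e7, e8, e9, e10]

theorem pv_votes (L : List String) : ∀ (v1 v2 v3 v4 : Int),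
    L.foldl (fun v t => (pvTICKER_TO_PHASES.getD t []).foldl pvIncr v) [v1, v2, v3, v4]
      = [v1 + pvCnt ["XLF", "XLY", "XLI", "XLK"] L,
         v2 + pvCnt ["XLK", "XLB", "XLE", "XLI"] L,
         v3 + pvCnt ["XLE", "XLV", "XLP", "XLU"] L,
         v4 + pvCnt ["XLU", "XLP", "XLV", "XLRE"] L] := by
  induction L with
  | nil => intro v1 v2 v3 v4; simp [pvCnt]
  | cons t tl ih =>
      intro v1 v2 v3 v4
      rw [List.foldl_cons, pv_step, ih]
      have h : ∀ P : List String, pvCnt P (t :: tl) = pvInd P t + pvCnt P tl := by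
        intro P
        by_cases hp : t ∈ P
        · simp [pvCnt, pvInd, List.filter_cons, hp]; omega
        · simp [pvCnt, pvInd, List.filter_cons, hp]
      simp [h, add_assoc]

def pvDictA (o1 o2 o3 o4 : Int) : PySem.Dict String Int :=
  let d1 := if 0 < o1 then PySem.Dict.empty.insert "Early Recovery" o1 else PySem.Dict.empty
  let d2 := if 0 < o2 then d1.insert "Mid Expansion" o2 else d1
  let d3 := if 0 < o3 then d2.insert "Late Cycle" o3 else d2
  if 0 < o4 then d3.insert "Contraction" o4 else d3

def pvRun (o1 o2 o3 o4 : Int) : Option String × Int :=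
  let a1 := if ((none, 0) : Option String × Int).2 < o1 then ((some "Early Recovery" : Option String), o1) else (none, 0)
  let a2 := if a1.2 < o2 then (some "Mid Expansion", o2) else a1
  let a3 := if a2.2 < o3 then (some "Late Cycle", o3) else a2
  if a3.2 < o4 then (some "Contraction", o4) else a3

def pvPick (o1 o2 o3 o4 : Int) : Option String :=
  match PySem.List.max? [o1, o2, o3, o4] (fun x => x) with
  | none => none
  | some best =>
    if best = 0 then none
    else
      match PySem.List.index? [o1, o2, o3, o4] best with
      | none => none
      | some k => pvPHASE_NAMES[k]?

theorem pv_coreA (o1 o2 o3 o4 : Int) :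
    PySem.List.max? (pvDictA o1 o2 o3 o4).keys (fun k => (pvDictA o1 o2 o3 o4).getD k 0)
      = (pvRun o1 o2 o3 o4).1 := by
  unfold pvDictA pvRun
  by_cases h1 : (0:Int) < o1 <;> by_cases h2 : (0:Int) < o2 <;> by_cases h3 : (0:Int) < o3 <;> by_cases h4 : (0:Int) < o4 <;>
    simp only [h1, h2, h3, h4, if_true, if_false] <;>
    simp [PySem.List.max?, PySem.Dict.insert, PySem.Dict.empty, PySem.Dict.keys,
      PySem.Dict.getD, PySem.Dict.get?, PySem.Dict.contains] <;>
    (try split_ifs) <;>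
    (try simp_all) <;>
    (try split_ifs) <;>
    first | rfl | omega | (simp_all; omega) | simp_all

theorem pv_coreB (o1 o2 o3 o4 : Int) (h1 : 0 ≤ o1) (h2 : 0 ≤ o2) (h3 : 0 ≤ o3) (h4 : 0 ≤ o4) :
    pvPick o1 o2 o3 o4 = (pvRun o1 o2 o3 o4).1 := by
  unfold pvPick pvRun
  rw [PySem.List.max?_id_cons]
  simp only [List.foldl_cons, List.foldl_nil, PySem.List.index?_eq_idxOf?, List.idxOf?,
    List.findIdx?_cons, List.findIdx?_nil, Option.map_none, beq_iff_eq]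
  split_ifs <;> (try simp only [Option.map_some, Option.map_none]) <;>
    (try simp [pvPHASE_NAMES]) <;> first | rfl | omega

theorem pv_nest (o1 o2 o3 o4 : Int) (cont : String → String) :
    (match PySem.List.max? [o1, o2, o3, o4] (fun x => x) with
     | none => "Unclear / Transitional"
     | some best =>
       if best = 0 then "Unclear / Transitional"
       else
         match PySem.List.index? [o1, o2, o3, o4] best with
         | none => "Unclear / Transitional"
         | some k =>
           match pvPHASE_NAMES[k]? with
           | none => "Unclear / Transitional"
           | some bp => cont bp)
    = (match pvPick o1 o2 o3 o4 with
       | none => "Unclear / Transitional"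
       | some bp => cont bp) := by
  unfold pvPick
  cases PySem.List.max? [o1, o2, o3, o4] (fun x => x) with
  | none => rfl
  | some best =>
    by_cases hb : best = 0
    · simp [hb]
    · simp only [hb, if_neg hb]
      cases PySem.List.index? [o1, o2, o3, o4] best with
      | none => rfl
      | some k => cases pvPHASE_NAMES[k]? <;> rfl

theorem pv_core (o1 o2 o3 o4 : Int) (h1 : 0 ≤ o1) (h2 : 0 ≤ o2) (h3 : 0 ≤ o3) (h4 : 0 ≤ o4)
    (cont : String → String) :
    (match PySem.List.max? (pvDictA o1 o2 o3 o4).keys (fun k => (pvDictA o1 o2 o3 o4).getD k 0) with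
     | none => "Unclear / Transitional"
     | some bp => cont bp)
    = (match PySem.List.max? [o1, o2, o3, o4] (fun x => x) with
       | none => "Unclear / Transitional"
       | some best =>
         if best = 0 then "Unclear / Transitional"
         else
           match PySem.List.index? [o1, o2, o3, o4] best with
           | none => "Unclear / Transitional"
           | some k =>
             match pvPHASE_NAMES[k]? with
             | none => "Unclear / Transitional"
             | some bp => cont bp) := by
  rw [pv_nest, pv_coreA, pv_coreB o1 o2 o3 o4 h1 h2 h3 h4]

theorem pv_main (ss : List (String × List (String × Int))) :
    infer_cycle_phase_py ss = infer_cycle_phase_py_alt ss := by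
  unfold infer_cycle_phase_py infer_cycle_phase_py_alt
  set L : List String :=
    ((PySem.Dict.ofList ss).items.filter
      (fun p => decide ((60 : Int) ≤ PySem.Dict.getD (PySem.Dict.ofList p.2) "score" 0))).map (fun p => p.1) with hdefL
  have hnd : L.Nodup := hdefL ▸ pv_L_nodup ss
  simp only [pvCYCLE_PHASES, List.foldl_cons, List.foldl_nil]
  rw [pv_overlap L hnd "XLF" "XLY" "XLI" "XLK" (by decide),
     pv_overlap L hnd "XLK" "XLB" "XLE" "XLI" (by decide),
     pv_overlap L hnd "XLE" "XLV" "XLP" "XLU" (by decide),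
     pv_overlap L hnd "XLU" "XLP" "XLV" "XLRE" (by decide)]
  have hrepl : List.replicate pvPHASE_NAMES.length (0 : Int) = [0, 0, 0, 0] := by decide
  rw [hrepl, pv_votes L 0 0 0 0]
  simp only [zero_add]
  have hc1 : 0 ≤ pvCnt ["XLF", "XLY", "XLI", "XLK"] L := Int.natCast_nonneg _
  have hc2 : 0 ≤ pvCnt ["XLK", "XLB", "XLE", "XLI"] L := Int.natCast_nonneg _
  have hc3 : 0 ≤ pvCnt ["XLE", "XLV", "XLP", "XLU"] L := Int.natCast_nonneg _
  have hc4 : 0 ≤ pvCnt ["XLU", "XLP", "XLV", "XLRE"] L := Int.natCast_nonneg _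
  generalize hg1 : pvCnt ["XLF", "XLY", "XLI", "XLK"] L = o1 at hc1 ⊢
  generalize hg2 : pvCnt ["XLK", "XLB", "XLE", "XLI"] L = o2 at hc2 ⊢
  generalize hg3 : pvCnt ["XLE", "XLV", "XLP", "XLU"] L = o3 at hc3 ⊢
  generalize hg4 : pvCnt ["XLU", "XLP", "XLV", "XLRE"] L = o4 at hc4 ⊢
  exact pv_core o1 o2 o3 o4 hc1 hc2 hc3 hc4 _

-- ===== VERDICT (by name: the statement is the Claim_ definition above) =====
theorem infer_cycle_phase_py_spec : Claim_equal_infer_cycle_phase_py := by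
  intro ss _
  exact pv_main ss
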